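-- pv_equiv track=rewrite | github.com/regomne/chinesize | qlie/packqliefp1.py | qlie_hash
-- ===== SOURCE A (Python) =====
-- def qlie_hash(stm):
--     mm0=[0 for i in range(4)]
--     mm2=[0 for i in range(4)]
--     for i in range(int(len(stm)/8)):
--         p = i * 8
--         for k in range(4):
--             mm2[k] = (mm2[k] & 0x0307) & 0xffff
--             v1 = ((stm[p + k*2] ^ mm2[k]) & 0xff) | ((stm[p + k*2 + 1] << 8) ^ (mm2[k] & 0xff00))
--             mm0[k] = (mm0[k] + v1) & 0xffff
--     return (mm0[0] ^ mm0[2]) | ((mm0[1] ^ mm0[3]) << 16)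
-- ===== SOURCE B (Python) =====
-- def qlie_hash(stm):
--     nblocks = len(stm) // 8
--     words = [(stm[2 * j] & 0xff) | (stm[2 * j + 1] << 8) for j in range(4 * nblocks)]
--     mm0 = [sum(words[4 * i + k] for i in range(nblocks)) & 0xffff for k in range(4)]
--     return (mm0[0] ^ mm0[2]) | ((mm0[1] ^ mm0[3]) << 16)
-- ===== Notes on version B (the rewrite author's own statement) =====
-- stated objective: alternative
-- what changed: Replaces A's fused parse-and-accumulate nested loop (with per-step 0xffff masking and a vestigial mm2 state that is provably always zero) by a two-pass decomposition: first build the flat list of little-endian 16-bit words, then sum each of the four columns and mask once at the end.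
import Mathlib
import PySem

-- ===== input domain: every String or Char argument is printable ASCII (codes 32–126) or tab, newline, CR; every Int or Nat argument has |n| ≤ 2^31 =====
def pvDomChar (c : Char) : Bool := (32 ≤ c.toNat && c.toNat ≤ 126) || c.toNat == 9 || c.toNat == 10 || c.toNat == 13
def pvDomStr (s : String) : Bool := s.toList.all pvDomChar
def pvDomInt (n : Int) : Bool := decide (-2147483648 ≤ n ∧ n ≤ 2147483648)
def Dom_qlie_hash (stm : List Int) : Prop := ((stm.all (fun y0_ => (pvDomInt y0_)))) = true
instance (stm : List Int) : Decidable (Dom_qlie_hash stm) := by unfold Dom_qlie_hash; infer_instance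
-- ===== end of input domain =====

-- B replaces A's fused parse-and-accumulate nested loop (with its vestigial mm2 state) by a
-- two-pass decomposition: build the flat 16-bit word list once, then sum the four columns,
-- masking once at the end; objective: alternative (same O(n) cost).

-- ===== PORT A =====
-- Inner loop body of A (for k in range(4)): updates mm2[k] then mm0[k] in place.
-- List.set with k.toNat is exact: k ranges over 0..3 and the lists have length 4, and
-- stm indices p+k*2(+1) are always in range (p+7 < len), so pyGetD's default is never used.
def qlieInner (stm : List Int) (p : Int) (st : List Int × List Int) (k : Int) : List Int × List Int :=
  let mm0 := st.1
  let mm2 := st.2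
  let mm2 := mm2.set k.toNat (PySem.Int.band (PySem.Int.band (PySem.List.pyGetD mm2 k 0) 0x0307) 0xffff)
  let v1 := PySem.Int.bor
      (PySem.Int.band (PySem.Int.bxor (PySem.List.pyGetD stm (p + k * 2) 0) (PySem.List.pyGetD mm2 k 0)) 0xff)
      (PySem.Int.bxor ((PySem.List.pyGetD stm (p + k * 2 + 1) 0) <<< 8) (PySem.Int.band (PySem.List.pyGetD mm2 k 0) 0xff00))
  let mm0 := mm0.set k.toNat (PySem.Int.band (PySem.List.pyGetD mm0 k 0 + v1) 0xffff)
  (mm0, mm2)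

-- int(len(stm)/8): exact as floor division since len(stm) ≥ 0 and far below 2^53.
def qlie_hash (stm : List Int) : Int :=
  let mm0 : List Int := (PySem.List.pyRange 0 4 1).map (fun _ => (0 : Int))
  let mm2 : List Int := (PySem.List.pyRange 0 4 1).map (fun _ => (0 : Int))
  let st :=
    (PySem.List.pyRange 0 (PySem.Int.floordiv (stm.length : Int) 8) 1).foldl
      (fun st i =>
        let p := i * 8
        (PySem.List.pyRange 0 4 1).foldl (qlieInner stm p) st)
      (mm0, mm2)
  PySem.Int.bor
    (PySem.Int.bxor (PySem.List.pyGetD st.1 0 0) (PySem.List.pyGetD st.1 2 0))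
    ((PySem.Int.bxor (PySem.List.pyGetD st.1 1 0) (PySem.List.pyGetD st.1 3 0)) <<< 16)

-- ===== PORT B =====
def qlie_hash_alt (stm : List Int) : Int :=
  let nblocks : Int := PySem.Int.floordiv (stm.length : Int) 8
  let words : List Int :=
    (PySem.List.pyRange 0 (4 * nblocks) 1).map (fun j =>
      PySem.Int.bor (PySem.Int.band (PySem.List.pyGetD stm (2 * j) 0) 0xff)
        ((PySem.List.pyGetD stm (2 * j + 1) 0) <<< 8))
  let mm0 : List Int :=
    (PySem.List.pyRange 0 4 1).map (fun k =>
      PySem.Int.band (((PySem.List.pyRange 0 nblocks 1).map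
        (fun i => PySem.List.pyGetD words (4 * i + k) 0)).sum) 0xffff)
  PySem.Int.bor
    (PySem.Int.bxor (PySem.List.pyGetD mm0 0 0) (PySem.List.pyGetD mm0 2 0))
    ((PySem.Int.bxor (PySem.List.pyGetD mm0 1 0) (PySem.List.pyGetD mm0 3 0)) <<< 16)

-- ===== PRECONDITION & SPEC =====
def Spec_qlie_hash (stm : List Int) (out : Int) : Prop := out = qlie_hash_alt stm
instance (stm : List Int) (out : Int) : Decidable (Spec_qlie_hash stm out) := by unfold Spec_qlie_hash; infer_instance

-- ===== CLAIM (what is proved, stated in full; the proofs are below) =====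
def Claim_equal_qlie_hash : Prop := ∀ (stm : List Int), Dom_qlie_hash stm → Spec_qlie_hash stm (qlie_hash stm)

-- ===== LEMMAS AND PROOFS =====

-- Little-endian 16-bit word number j of the stream (bytes 2j, 2j+1).
def wrd (stm : List Int) (j : Int) : Int :=
  PySem.Int.bor (PySem.Int.band (PySem.List.pyGetD stm (2 * j) 0) 0xff)
    ((PySem.List.pyGetD stm (2 * j + 1) 0) <<< 8)

def colS (stm : List Int) (k : Int) (m : Nat) : Int :=
  ((List.range m).map (fun (i : Nat) => wrd stm (4 * (i : Int) + k))).sum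

theorem colS_succ (stm : List Int) (k : Int) (m : Nat) :
    colS stm k (m + 1) = colS stm k m + wrd stm (4 * (m : Int) + k) := by
  simp [colS, List.range_succ]

theorem bandMask (a : Int) : PySem.Int.band a 65535 = a % 65536 := by
  unfold PySem.Int.band
  split_ifs with h1 h2 h3
  · rw [show ((65535:Int).toNat) = 65535 from rfl, Nat.and_two_pow_sub_one_eq_mod a.toNat 16]
    omega
  · omega
  · rw [show ((65535:Int).toNat) = 65535 from rfl, Nat.and_comm,
      Nat.and_two_pow_sub_one_eq_mod (-a-1).toNat 16]
    have : (-a-1).toNat % 65536 < 65536 := Nat.mod_lt _ (by norm_num)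
    omega
  · omega

theorem maskAdd (x y : Int) :
    PySem.Int.band (PySem.Int.band x 65535 + y) 65535 = PySem.Int.band (x + y) 65535 := by
  rw [bandMask, bandMask, bandMask]; omega

theorem inner_block (stm : List Int) (i a0 a1 a2 a3 : Int) :
    (PySem.List.pyRange 0 4 1).foldl (qlieInner stm (i * 8)) ([a0, a1, a2, a3], [0, 0, 0, 0]) =
      ([PySem.Int.band (a0 + wrd stm (4 * i)) 65535,
        PySem.Int.band (a1 + wrd stm (4 * i + 1)) 65535,
        PySem.Int.band (a2 + wrd stm (4 * i + 2)) 65535,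
        PySem.Int.band (a3 + wrd stm (4 * i + 3)) 65535], [0, 0, 0, 0]) := by
  have h4 : PySem.List.pyRange 0 4 1 = [0, 1, 2, 3] := by decide
  rw [h4]
  have hz : PySem.Int.band (PySem.Int.band 0 775) 65535 = 0 := by decide
  have hz2 : PySem.Int.band 0 65280 = 0 := by decide
  simp [qlieInner, wrd, List.foldl, PySem.List.pyGetD, hz, hz2, PySem.Int.bxor_zero]
  ring_nf
  exact ⟨trivial, trivial, trivial, trivial⟩

theorem A_loop (stm : List Int) (m : Nat) (a0 a1 a2 a3 : Int) :
    (PySem.List.pyRange 0 (m : Int) 1).foldl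
        (fun st i => (PySem.List.pyRange 0 4 1).foldl (qlieInner stm (i * 8)) st)
        ([PySem.Int.band a0 65535, PySem.Int.band a1 65535,
          PySem.Int.band a2 65535, PySem.Int.band a3 65535],
         [PySem.Int.band 0 65535, PySem.Int.band 0 65535,
          PySem.Int.band 0 65535, PySem.Int.band 0 65535]) =
      ([PySem.Int.band (a0 + colS stm 0 m) 65535,
        PySem.Int.band (a1 + colS stm 1 m) 65535,
        PySem.Int.band (a2 + colS stm 2 m) 65535,
        PySem.Int.band (a3 + colS stm 3 m) 65535], [0, 0, 0, 0]) := by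
  rw [show ([PySem.Int.band 0 65535, PySem.Int.band 0 65535, PySem.Int.band 0 65535,
      PySem.Int.band 0 65535] : List Int) = [0, 0, 0, 0] from by decide]
  induction m generalizing a0 a1 a2 a3 with
  | zero =>
    simp only [Nat.cast_zero]
    rw [PySem.List.pyRange_one_eq_nil (le_refl 0)]
    simp [colS]
  | succ m ih =>
    have hsplit : PySem.List.pyRange 0 ((m + 1 : Nat) : Int) 1 =
        PySem.List.pyRange 0 (m : Int) 1 ++ [(m : Int)] := by
      push_cast
      exact PySem.List.pyRange_one_succ_right (by positivity)
    rw [hsplit, List.foldl_append, ih]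
    simp only [List.foldl_cons, List.foldl_nil]
    rw [inner_block]
    have cs0 := colS_succ stm 0 m
    have cs1 := colS_succ stm 1 m
    have cs2 := colS_succ stm 2 m
    have cs3 := colS_succ stm 3 m
    simp only [add_zero] at cs0
    rw [cs0, cs1, cs2, cs3]
    simp only [maskAdd, add_assoc]

theorem B_col (stm : List Int) (m : Nat) (k : Int) (hk0 : 0 ≤ k) (hk : k < 4) :
    ((PySem.List.pyRange 0 ((m : Nat) : Int) 1).map
        (fun i => PySem.List.pyGetD
          ((PySem.List.pyRange 0 (4 * ((m : Nat) : Int)) 1).map (fun j =>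
            PySem.Int.bor (PySem.Int.band (PySem.List.pyGetD stm (2 * j) 0) 0xff)
              ((PySem.List.pyGetD stm (2 * j + 1) 0) <<< 8)))
          (4 * i + k) 0)).sum = colS stm k m := by
  rw [List.map_congr_left (fun i hi => by
    have hb := (PySem.List.mem_pyRange_one).mp hi
    rw [PySem.List.pyGetD_map_pyRange_of_nonneg _ _ _ _ (by omega) (by omega)])]
  rw [PySem.List.pyRange_one]
  simp only [sub_zero, Int.toNat_natCast, List.map_map]
  unfold colS
  refine congrArg List.sum (List.map_congr_left ?_)
  intro a _
  simp [wrd]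

-- ===== VERDICT (by name: the statement is the Claim_ definition above) =====
theorem qlie_hash_spec : Claim_equal_qlie_hash := by
  intro stm _
  show qlie_hash stm = qlie_hash_alt stm
  have hflo : PySem.Int.floordiv ((stm.length : Nat) : Int) 8 = ((stm.length / 8 : Nat) : Int) := by
    exact_mod_cast PySem.Int.floordiv_natCast stm.length 8
  simp only [qlie_hash, qlie_hash_alt]
  rw [hflo]
  rw [show (PySem.List.pyRange 0 4 1).map (fun _ => (0:Int)) =
      [PySem.Int.band 0 65535, PySem.Int.band 0 65535, PySem.Int.band 0 65535,
       PySem.Int.band 0 65535] from by decide]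
  rw [A_loop]
  rw [show PySem.List.pyRange 0 4 1 = [0,1,2,3] from by decide]
  simp only [List.map_cons, List.map_nil]
  rw [B_col stm (stm.length / 8) 0 (by norm_num) (by norm_num),
      B_col stm (stm.length / 8) 1 (by norm_num) (by norm_num),
      B_col stm (stm.length / 8) 2 (by norm_num) (by norm_num),
      B_col stm (stm.length / 8) 3 (by norm_num) (by norm_num)]
  simp [PySem.List.pyGetD, PySem.List.pyGet?]
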